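-- pv_equiv track=rewrite | github.com/devanshsharma2002/PythonPracticals | Practical6/rom.py | rom
-- ===== SOURCE A (Python) =====
-- def rom(string, base):
--     # Define Roman numeral symbols and their values
--     roman_to_int = {
--         'I': 1,
--         'V': 5,
--         'X': 10,
--         'L': 50,
--         'C': 100,
--         'D': 500,
--         'M': 1000
--     }
--
--     # Convert Roman numeral string to integer
--     def roman_to_integer(roman):
--         total = 0
--         prev_value = 0
--
--         for char in roman:
--             if char in roman_to_int:
--                 current_value = roman_to_int[char]
--                 if prev_value < current_value:
--                     total += current_value - 2 * prev_value
--                 else: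
--                     total += current_value
--                 prev_value = current_value
--             else:
--                 raise ValueError(f"Invalid Roman numeral character: {char}")
--         return total
--
--     # Convert integer to the desired base
--     def integer_to_base(num, base):
--         if num == 0:
--             return "0"
--         digits = []
--         while num:
--             digits.append(int(num % base))
--             num //= base
--         return ''.join(str(d) for d in digits[::-1])
--
--     # Convert Roman numeral to integer
--     integer_value = roman_to_integer(string)
--
--     # Handle invalid base
--     if base < 2 or base > 36:
--         raise ValueError("Base must be between 2 and 36.")
--
--     # Convert integer to the desired base
--     return integer_to_base(integer_value, base)
-- ===== SOURCE B (Python) =====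
-- def rom(string, base):
--     values = {'I': 1, 'V': 5, 'X': 10, 'L': 50, 'C': 100, 'D': 500, 'M': 1000}
--     n = len(string)
--     total = 0
--     for i in range(n):
--         c = string[i]
--         if c not in values:
--             raise ValueError(f"Invalid Roman numeral character: {c}")
--         v = values[c]
--         # subtractive form: this symbol is followed by a strictly larger one
--         if i + 1 < n and string[i + 1] in values and values[string[i + 1]] > v:
--             total -= v
--         else:
--             total += v
--     if base < 2 or base > 36:
--         raise ValueError("Base must be between 2 and 36.")
--
--     def to_base(num):
--         if num == 0:
--             return ""
--         q, r = divmod(num, base)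
--         return to_base(q) + str(r)
--
--     return "0" if total == 0 else to_base(total)
-- ===== Notes on version B (the rewrite author's own statement) =====
-- stated objective: alternative
-- what changed: Roman parsing switches from a previous-value accumulator with a subtract-twice correction to an index-based lookahead that adds or subtracts each symbol directly, and the base conversion switches from a build-digit-list-then-reverse-and-join loop to a recursive divmod helper that concatenates the high-order part first.
import Mathlib
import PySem

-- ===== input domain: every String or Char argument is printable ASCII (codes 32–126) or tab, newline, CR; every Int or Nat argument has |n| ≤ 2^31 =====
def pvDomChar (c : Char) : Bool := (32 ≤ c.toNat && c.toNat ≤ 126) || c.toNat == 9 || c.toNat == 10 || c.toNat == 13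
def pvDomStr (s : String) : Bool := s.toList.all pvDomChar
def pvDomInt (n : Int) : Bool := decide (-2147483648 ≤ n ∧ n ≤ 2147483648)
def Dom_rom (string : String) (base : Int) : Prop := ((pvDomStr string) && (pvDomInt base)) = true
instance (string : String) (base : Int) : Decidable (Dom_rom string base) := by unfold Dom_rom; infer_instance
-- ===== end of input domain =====

-- B replaces A's previous-value accumulator by a lookahead add/subtract pass and the
-- digit-list-reverse-join base conversion by a recursive divmod concatenation (alternative, same cost).


-- ===== PORT A =====
-- the roman_to_int dict as a lookup (none = char not in the dict → ValueError)
def romVal? (c : Char) : Option Int :=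
  if c = 'I' then some 1 else if c = 'V' then some 5 else if c = 'X' then some 10
  else if c = 'L' then some 50 else if c = 'C' then some 100 else if c = 'D' then some 500
  else if c = 'M' then some 1000 else none

-- termination helper for both while/recursion ports (cited in decreasing_by)
theorem pvFloordivToNatLt (num base : Int) (h0 : 0 < num) (hb : 1 < base) :
    (PySem.Int.floordiv num base).toNat < num.toNat := by
  rw [PySem.Int.floordiv_eq_ediv_of_pos (by omega)]
  have h1 : num / base < num := by
    rw [Int.ediv_lt_iff_lt_mul (by omega : (0:Int) < base)]; nlinarith
  have h2 : 0 ≤ num / base := Int.ediv_nonneg (by omega) (by omega)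
  omega

-- A's roman_to_integer loop: state (total, prev); none = the raise on an invalid char
def romAGo : List Char → Int → Int → Option Int
  | [], total, _ => some total
  | c :: cs, total, prev =>
    match romVal? c with
    | some v => romAGo cs (if prev < v then total + (v - 2 * prev) else total + v) v
    | none => none

-- A's 'while num:' digit loop (LSB first, as Python appends); the guard 'num ≤ 0 ∨ base ≤ 1'
-- makes the same loop total (Python diverges/raises there; unreachable under Pre_rom)
def romADigits (base num : Int) : List Int :=
  if _h : num ≤ 0 ∨ base ≤ 1 then []
  else PySem.Int.mod num base :: romADigits base (PySem.Int.floordiv num base)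
  termination_by num.toNat
  decreasing_by exact pvFloordivToNatLt num base (by omega) (by omega)

-- A's integer_to_base: ''.join(str(d) for d in digits[::-1])
def romAConvert (num base : Int) : String :=
  if num = 0 then "0"
  else String.ofList (PySem.Chars.join [] ((romADigits base num).reverse.map PySem.Int.toChars))

def rom (string : String) (base : Int) : String :=
  match romAGo string.toList 0 0 with
  | none => ""                                   -- ValueError: invalid roman char (excluded by Pre_rom)
  | some n =>
    if base < 2 ∨ base > 36 then ""              -- ValueError: bad base (excluded by Pre_rom)
    else romAConvert n base

-- ===== PORT B =====
-- B's lookahead test: next position exists, holds a valid symbol, and its value is larger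
def romLook (v : Int) (cs : List Char) : Bool :=
  match cs with
  | [] => false
  | d :: _ => match romVal? d with
    | some w => decide (v < w)
    | none => false

-- B's forward loop: add the symbol, or subtract it when the lookahead sees a larger one
def romBGo : List Char → Int → Option Int
  | [], total => some total
  | c :: cs, total =>
    match romVal? c with
    | none => none                               -- ValueError, first invalid char
    | some v => romBGo cs (if romLook v cs then total - v else total + v)

-- B's recursive to_base: to_base(q) + str(r); guard extended to num ≤ 0 ∨ base ≤ 1 for
-- termination (Python's num == 0; negatives/bad base unreachable under Pre_rom)
def romBToChars (base num : Int) : List Char :=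
  if _h : num ≤ 0 ∨ base ≤ 1 then []
  else romBToChars base (PySem.Int.floordiv num base) ++ PySem.Int.toChars (PySem.Int.mod num base)
  termination_by num.toNat
  decreasing_by exact pvFloordivToNatLt num base (by omega) (by omega)

def rom_alt (string : String) (base : Int) : String :=
  match romBGo string.toList 0 with
  | none => ""
  | some t =>
    if base < 2 ∨ base > 36 then ""
    else if t = 0 then "0" else String.ofList (romBToChars base t)

-- ===== PRECONDITION & SPEC =====
-- Pre_ excludes exactly the inputs where A raises ValueError: a character outside the
-- roman_to_int dict, or a base outside 2..36.
def Pre_rom (string : String) (base : Int) : Prop :=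
  (string.toList.all (fun c => (['I', 'V', 'X', 'L', 'C', 'D', 'M'] : List Char).contains c)) = true
    ∧ 2 ≤ base ∧ base ≤ 36
instance (string : String) (base : Int) : Decidable (Pre_rom string base) := by
  unfold Pre_rom; infer_instance
def pvWitness_rom : String × Int := ("XIV", 10)

def Spec_rom (string : String) (base : Int) (out : String) : Prop := out = rom_alt string base
instance (string : String) (base : Int) (out : String) : Decidable (Spec_rom string base out) := by
  unfold Spec_rom; infer_instance

-- ===== CLAIM (what is proved, stated in full; the proofs are below) =====
def Claim_equal_rom : Prop := ∀ (string : String) (base : Int),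
  Dom_rom string base → Pre_rom string base → Spec_rom string base (rom string base)

-- ===== LEMMAS AND PROOFS =====

-- correction term relating A's prev-state to B's lookahead accumulator
def romAdj (l : List Char) (prev : Int) : Int :=
  match l with
  | [] => 0
  | c :: _ => match romVal? c with
    | some v => if prev < v then 2 * prev else 0
    | none => 0

theorem romGo_rel (l : List Char) : ∀ (total prev : Int),
    romAGo l total prev = romBGo l (total - romAdj l prev) := by
  induction l with
  | nil => intro t p; simp [romAGo, romBGo, romAdj]
  | cons c cs ih =>
    intro t p
    cases hv : romVal? c with
    | none => simp [romAGo, romBGo, hv]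
    | some v =>
      simp only [romAGo, romBGo, romAdj, hv]
      rw [ih]
      congr 1
      cases cs with
      | nil => simp [romAdj, romLook]; split_ifs <;> omega
      | cons d ds =>
        cases hw : romVal? d with
        | none => simp [romAdj, romLook, hw]; split_ifs <;> omega
        | some w => simp [romAdj, romLook, hw]; split_ifs <;> omega

theorem romAdj_zero (l : List Char) : romAdj l 0 = 0 := by
  cases l with
  | nil => rfl
  | cons c cs =>
    cases h : romVal? c with
    | none => simp [romAdj, h]
    | some v => simp [romAdj, h]

theorem romGo_zero (l : List Char) : romAGo l 0 0 = romBGo l 0 := by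
  rw [romGo_rel l 0 0, romAdj_zero]; norm_num

theorem romVal_mem (c : Char) (h : c ∈ (['I', 'V', 'X', 'L', 'C', 'D', 'M'] : List Char)) :
    ∃ v, romVal? c = some v ∧ v ∈ ([1, 5, 10, 50, 100, 500, 1000] : List Int) := by
  fin_cases h <;> exact ⟨_, rfl, by decide⟩

theorem romContrib_nonneg : ∀ p ∈ ([0, 1, 5, 10, 50, 100, 500, 1000] : List Int),
    ∀ v ∈ ([1, 5, 10, 50, 100, 500, 1000] : List Int), 0 ≤ if p < v then v - 2 * p else v := by
  decide

theorem romAGo_ge (l : List Char) : ∀ (total prev : Int),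
    (∀ c ∈ l, c ∈ (['I', 'V', 'X', 'L', 'C', 'D', 'M'] : List Char)) →
    prev ∈ ([0, 1, 5, 10, 50, 100, 500, 1000] : List Int) →
    ∃ r, romAGo l total prev = some r ∧ total ≤ r := by
  induction l with
  | nil => exact fun t _ _ _ => ⟨t, rfl, le_refl t⟩
  | cons c cs ih =>
    intro t p hv hp
    obtain ⟨v, hcv, hvS⟩ := romVal_mem c (hv c (by simp))
    have hvS0 : v ∈ ([0, 1, 5, 10, 50, 100, 500, 1000] : List Int) := by
      fin_cases hvS <;> decide
    obtain ⟨r, hr, hle⟩ := ih (if p < v then t + (v - 2 * p) else t + v) v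
      (fun d hd => hv d (by simp [hd])) hvS0
    have hc : 0 ≤ if p < v then v - 2 * p else v := romContrib_nonneg p hp v hvS
    refine ⟨r, ?_, ?_⟩
    · simp only [romAGo, hcv]
      exact hr
    · split_ifs at hle hc <;> omega

theorem joinNil_flatten (l : List (List Char)) : PySem.Chars.join [] l = l.flatten := by
  induction l with
  | nil => simp [PySem.Chars.join_nil]
  | cons a t ih =>
    cases t with
    | nil => simp [PySem.Chars.join_singleton]
    | cons b u => rw [PySem.Chars.join_cons_cons]; simp [ih]

theorem romConv_eq (base num : Int) :
    PySem.Chars.join [] ((romADigits base num).reverse.map PySem.Int.toChars)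
      = romBToChars base num := by
  by_cases h : num ≤ 0 ∨ base ≤ 1
  · rw [romADigits, romBToChars, dif_pos h, dif_pos h]
    simp [PySem.Chars.join_nil]
  · have ih := romConv_eq base (PySem.Int.floordiv num base)
    rw [romADigits, romBToChars, dif_neg h, dif_neg h]
    rw [joinNil_flatten] at ih ⊢
    simp only [List.reverse_cons, List.map_append, List.flatten_append]
    rw [ih]
    simp
  termination_by num.toNat
  decreasing_by exact pvFloordivToNatLt num base (by omega) (by omega)

-- ===== VERDICT (by name: the statement is the Claim_ definition above) =====
theorem rom_spec : Claim_equal_rom := by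
  intro s b _hdom hpre
  obtain ⟨hv, hb1, hb2⟩ := hpre
  have hv' : ∀ c ∈ s.toList, c ∈ (['I', 'V', 'X', 'L', 'C', 'D', 'M'] : List Char) := by
    intro c hc
    have := List.all_eq_true.mp hv c hc
    simpa using this
  obtain ⟨r, hr, hr0⟩ := romAGo_ge s.toList 0 0 hv' (by decide)
  have hB : romBGo s.toList 0 = some r := by rw [← romGo_zero, hr]
  unfold Spec_rom rom rom_alt
  rw [hr, hB]
  simp only
  have hb : ¬(b < 2 ∨ b > 36) := by omega
  rw [if_neg hb, if_neg hb]
  unfold romAConvert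
  by_cases hz : r = 0
  · rw [if_pos hz, if_pos hz]
  · rw [if_neg hz, if_neg hz]
    exact congrArg String.ofList (romConv_eq b r)
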